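-- pv_equiv track=rewrite | github.com/wakate/shiorin | time_table.py | count_session
-- ===== SOURCE A (Python) =====
-- def count_session(rows):
--     program = list(map(lambda v: v[1], rows))
--     find_flag = -1
--     flaged_index = -1
--     counter = []
--     for i, v in enumerate(program):
--         counter.append(1)
--         if find_flag > 0:
--             counter[i] -= 1
--             counter[flaged_index] += 1
--         try:
--             find_index = program.index(v, i + 1)
--         except ValueError:
--             find_flag = -1
--             continue
--
--         if find_index - i > 1:
--             find_flag = -1
--             continue
--
--         if find_flag < 0:
--             find_flag = 1
--             flaged_index = i
--
--     return counter
-- ===== SOURCE B (Python) =====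
-- def count_session(rows):
--     program = [v[1] for v in rows]
--     counter = []
--     n = len(program)
--     i = 0
--     while i < n:
--         j = i
--         while j + 1 < n and program[j + 1] == program[j]:
--             j += 1
--         counter.append(j - i + 1)
--         counter.extend([0] * (j - i))
--         i = j + 1
--     return counter
-- ===== Notes on version B (the rewrite author's own statement) =====
-- stated objective: simpler
-- what changed: Replaced A's per-element find_flag/flaged_index state machine with program.index lookahead scans by direct run-length grouping: advance over each maximal run of adjacent equal program values and emit its length followed by zeros.
import Mathlib
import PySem

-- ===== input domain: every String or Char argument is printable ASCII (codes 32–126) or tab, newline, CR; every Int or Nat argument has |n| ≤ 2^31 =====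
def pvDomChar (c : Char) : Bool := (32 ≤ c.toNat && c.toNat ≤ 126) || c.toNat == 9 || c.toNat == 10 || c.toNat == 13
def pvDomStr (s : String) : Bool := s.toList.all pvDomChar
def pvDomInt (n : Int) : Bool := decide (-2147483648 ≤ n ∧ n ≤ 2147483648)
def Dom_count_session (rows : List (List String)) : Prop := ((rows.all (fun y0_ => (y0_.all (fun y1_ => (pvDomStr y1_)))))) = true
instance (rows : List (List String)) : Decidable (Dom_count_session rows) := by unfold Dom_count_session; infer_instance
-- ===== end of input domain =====

-- B replaces A's per-element flag/accumulator state machine by direct run-length grouping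
-- (find each maximal run of adjacent equal program values, emit its length then zeros): simpler.


-- ===== PORT A =====
-- one iteration of A's for-loop; state = (find_flag, flaged_index, counter)
def csStep (program : List String) (st : Int × Int × List Int) (iv : Int × String) : Int × Int × List Int :=
  let find_flag := st.1
  let flaged_index := st.2.1
  let counter := st.2.2
  let i := iv.1
  let v := iv.2
  let counter := counter ++ [1]
  let counter :=
    if find_flag > 0 then
      -- counter[i] -= 1; counter[flaged_index] += 1 — both indices are nonnegative and in
      -- range whenever this branch runs, so List.set/getD at .toNat is exact here
      let counter := counter.set i.toNat ((counter.getD i.toNat 0) - 1)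
      counter.set flaged_index.toNat ((counter.getD flaged_index.toNat 0) + 1)
    else counter
  -- program.index(v, i+1): first index ≥ i+1 with that value (i+1 ≥ 0 here), exact as
  -- index? on the dropped prefix shifted back
  match (PySem.List.index? (program.drop (i+1).toNat) v).map (fun k => (k : Int) + (i+1)) with
  | none => (-1, flaged_index, counter)
  | some find_index =>
    if find_index - i > 1 then (-1, flaged_index, counter)
    else if find_flag < 0 then (1, i, counter)
    else (find_flag, flaged_index, counter)

def count_session (rows : List (List String)) : List Int :=
  -- v[1]: in range under Pre_count_session, so getD is exact there
  let program := rows.map (fun v => (PySem.List.pyGet? v 1).getD "")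
  ((PySem.List.enumerate program 0).foldl (csStep program) (-1, -1, [])).2.2

-- ===== PORT B =====
-- inner while: number of further elements chained equal to the previous one (j - i)
def csRunlen (x : String) : List String → Nat
  | [] => 0
  | y :: ys => if y = x then csRunlen y ys + 1 else 0

-- outer while: one maximal run per step; emit run length then (run length - 1) zeros
def csGroup : List String → List Int
  | [] => []
  | x :: xs =>
    let k := csRunlen x xs
    ((k : Int) + 1) :: (List.replicate k 0 ++ csGroup (xs.drop k))
termination_by l => l.length
decreasing_by simp

def count_session_alt (rows : List (List String)) : List Int :=
  csGroup (rows.map (fun v => (PySem.List.pyGet? v 1).getD ""))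

-- ===== PRECONDITION & SPEC =====
-- A raises IndexError (v[1]) on any row with fewer than 2 entries; exactly those are excluded.
def Pre_count_session (rows : List (List String)) : Prop := ∀ r ∈ rows, 2 ≤ r.length
instance (rows : List (List String)) : Decidable (Pre_count_session rows) := by
  unfold Pre_count_session; infer_instance
def pvWitness_count_session : List (List String) := [["x", "a"], ["y", "a"], ["z", "b"]]

def Spec_count_session (rows : List (List String)) (out : List Int) : Prop := out = count_session_alt rows
instance (rows : List (List String)) (out : List Int) : Decidable (Spec_count_session rows out) := by unfold Spec_count_session; infer_instance

-- ===== CLAIM (what is proved, stated in full; the proofs are below) =====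
def Claim_equal_count_session : Prop := ∀ (rows : List (List String)), Dom_count_session rows → Pre_count_session rows → Spec_count_session rows (count_session rows)

-- ===== LEMMAS AND PROOFS =====

def csAddAt (s : Nat) (n : Int) (c : List Int) : List Int := c.set s (c.getD s 0 + n)

def csChain : List String → Nat
  | [] => 0
  | x :: xs => csRunlen x xs + 1

theorem length_csAddAt (s : Nat) (n : Int) (c : List Int) : (csAddAt s n c).length = c.length := by
  simp [csAddAt]

theorem csAddAt_append (s : Nat) (n : Int) (c d : List Int) (hs : s < c.length) :
    csAddAt s n (c ++ d) = csAddAt s n c ++ d := by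
  simp [csAddAt, List.getD, List.getElem?_append_left hs, List.set_append_left _ _ hs]

theorem csAddAt_last (n : Int) (c : List Int) (a : Int) :
    csAddAt c.length n (c ++ [a]) = c ++ [a + n] := by
  simp [csAddAt, List.set_append_right]

theorem csAddAt_zero (s : Nat) (c : List Int) (hs : s < c.length) : csAddAt s 0 c = c := by
  simp [csAddAt, List.getD, List.getElem?_eq_getElem hs, List.set_getElem_self]

theorem csAddAt_csAddAt (s : Nat) (n m : Int) (c : List Int) (hs : s < c.length) :
    csAddAt s n (csAddAt s m c) = csAddAt s (m + n) c := by
  simp [csAddAt, List.getD, hs, add_assoc]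

theorem cs_drop_succ {α : Type} {program : List α} {i : Nat} {x : α} {xs : List α}
    (h : program.drop i = x :: xs) : program.drop (i+1) = xs := by
  have := congrArg List.tail h
  simpa [List.tail_drop] using this

theorem cs_toNat_succ (i : Nat) : ((i : Int) + 1).toNat = i + 1 := by omega

theorem cs_scrut_adj (program : List String) (i : Nat) (x : String) (xs : List String)
    (h : program.drop (i+1) = xs) (hx : xs.head? = some x) :
    (PySem.List.index? (program.drop ((i:Int)+1).toNat) x).map (fun k => (k : Int) + ((i:Int)+1))
      = some ((i:Int)+1) := by
  rw [cs_toNat_succ, h]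
  cases xs with
  | nil => simp at hx
  | cons y ys =>
    simp at hx
    subst hx
    rw [PySem.List.index?_cons_self]
    simp

theorem cs_scrut_nonadj (program : List String) (i : Nat) (x : String) (xs : List String)
    (h : program.drop (i+1) = xs) (hx : xs.head? ≠ some x) :
    (PySem.List.index? (program.drop ((i:Int)+1).toNat) x).map (fun k => (k : Int) + ((i:Int)+1)) = none
    ∨ ∃ m : Nat, (PySem.List.index? (program.drop ((i:Int)+1).toNat) x).map (fun k => (k : Int) + ((i:Int)+1))
        = some (((m:Int) + 1) + ((i:Int)+1)) := by
  rw [cs_toNat_succ, h]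
  cases xs with
  | nil => left; simp [PySem.List.index?]
  | cons y ys =>
    have hyx : y ≠ x := by simpa using hx
    rw [PySem.List.index?_cons_of_ne ys hyx]
    cases hidx : PySem.List.index? ys x with
    | none => left; simp
    | some m => right; exact ⟨m, by simp⟩

theorem csMain (program : List String) (l : List String) :
    (∀ (i : Nat) (c : List Int) (s : Int), program.drop i = l → c.length = i →
      ((PySem.List.enumerate l (i:Int)).foldl (csStep program) (-1, s, c)).2.2 = c ++ csGroup l)
    ∧ (∀ (i s : Nat) (c : List Int), program.drop i = l → c.length = i → s < i →
      ((PySem.List.enumerate l (i:Int)).foldl (csStep program) (1, (s:Int), c)).2.2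
        = csAddAt s (csChain l : Int) c ++ (List.replicate (csChain l) 0 ++ csGroup (l.drop (csChain l)))) := by
  induction l with
  | nil =>
    constructor
    · intro i c s _ _; simp [PySem.List.enumerate, csGroup]
    · intro i s c _ hlen hsi
      simp [PySem.List.enumerate, csChain, csGroup, csAddAt_zero s c (by omega)]
  | cons x xs ih =>
    constructor
    · intro i c s hdrop hlen
      have hdrop' : program.drop (i+1) = xs := cs_drop_succ hdrop
      rw [PySem.List.enumerate_cons, List.foldl_cons]
      by_cases hadj : xs.head? = some x
      · have hstep : csStep program (-1, s, c) ((i:Int), x) = (1, (i:Int), c ++ [1]) := by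
          simp only [csStep]
          rw [cs_scrut_adj program i x xs hdrop' hadj]
          norm_num
        rw [hstep]
        obtain ⟨ys, rfl⟩ : ∃ ys, xs = x :: ys := by
          cases xs with
          | nil => simp at hadj
          | cons y ys => simp at hadj; exact ⟨ys, by rw [hadj]⟩
        have hrec := ih.2 (i+1) i (c ++ [1]) (by exact_mod_cast hdrop') (by simp [hlen]) (by omega)
        push_cast at hrec
        rw [hrec]
        have : csAddAt i ((csChain (x :: ys) : Nat) : Int) (c ++ [1]) = c ++ [1 + (csChain (x :: ys) : Int)] := by
          rw [← hlen]; exact csAddAt_last _ c 1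
        rw [this]
        have hg : csGroup (x :: x :: ys) =
            ((csChain (x :: ys) : Int) + 1) :: (List.replicate (csChain (x :: ys)) 0 ++ csGroup ((x :: ys).drop (csChain (x :: ys)))) := by
          rw [csGroup]
          simp [csRunlen, csChain]
        rw [hg]
        simp [add_comm]
      · have hstep : csStep program (-1, s, c) ((i:Int), x) = (-1, s, c ++ [1]) := by
          rcases cs_scrut_nonadj program i x xs hdrop' hadj with hnone | ⟨m, hsome⟩
          · simp only [csStep]; rw [hnone]; norm_num
          · simp only [csStep]; rw [hsome]
            have hgt : ((m:Int) + 1) + ((i:Int)+1) - i > 1 := by omega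
            norm_num [hgt]
        rw [hstep]
        have hrec := ih.1 (i+1) (c ++ [1]) s (by exact_mod_cast hdrop') (by simp [hlen])
        push_cast at hrec
        rw [hrec]
        have hk : csRunlen x xs = 0 := by
          cases xs with
          | nil => rfl
          | cons y ys => have : y ≠ x := by simpa using hadj
                         simp [csRunlen, this]
        rw [csGroup]
        simp [hk]
    · intro i s c hdrop hlen hsi
      have hdrop' : program.drop (i+1) = xs := cs_drop_succ hdrop
      rw [PySem.List.enumerate_cons, List.foldl_cons]
      have hsc : s < c.length := by omega
      have hcnt : ((c ++ [1]).set ((i:Int)).toNat (((c ++ [1]).getD ((i:Int)).toNat 0) - 1)).set ((s:Int)).toNat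
            ((((c ++ [1]).set ((i:Int)).toNat (((c ++ [1]).getD ((i:Int)).toNat 0) - 1)).getD ((s:Int)).toNat 0) + 1)
            = csAddAt s 1 c ++ [0] := by
        have h1 : (c ++ [1]).set ((i:Int)).toNat (((c ++ [1]).getD ((i:Int)).toNat 0) - 1) = c ++ [0] := by
          rw [Int.toNat_natCast, ← hlen]
          simp [List.set_append_right, List.getD]
        rw [h1, Int.toNat_natCast]
        rw [← csAddAt_append s 1 c [0] hsc]
        rfl
      by_cases hadj : xs.head? = some x
      · have hstep : csStep program (1, (s:Int), c) ((i:Int), x) = (1, (s:Int), csAddAt s 1 c ++ [0]) := by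
          simp only [csStep]
          rw [cs_scrut_adj program i x xs hdrop' hadj]
          norm_num
          exact hcnt
        rw [hstep]
        obtain ⟨ys, rfl⟩ : ∃ ys, xs = x :: ys := by
          cases xs with
          | nil => simp at hadj
          | cons y ys => simp at hadj; exact ⟨ys, by rw [hadj]⟩
        have hrec := ih.2 (i+1) s (csAddAt s 1 c ++ [0]) (by exact_mod_cast hdrop')
          (by simp [length_csAddAt, hlen]) (by omega)
        push_cast at hrec
        rw [hrec]
        rw [csAddAt_append s _ _ [0] (by rw [length_csAddAt]; exact hsc)]
        rw [csAddAt_csAddAt s _ 1 c hsc]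
        have hch : csChain (x :: x :: ys) = csChain (x :: ys) + 1 := by
          simp [csChain, csRunlen]
        rw [hch]
        push_cast
        simp [List.replicate_succ, add_comm]
      · have hstep : csStep program (1, (s:Int), c) ((i:Int), x) = (-1, (s:Int), csAddAt s 1 c ++ [0]) := by
          rcases cs_scrut_nonadj program i x xs hdrop' hadj with hnone | ⟨m, hsome⟩
          · simp only [csStep]; rw [hnone]; norm_num; exact hcnt
          · simp only [csStep]; rw [hsome]
            have hgt : ((m:Int) + 1) + ((i:Int)+1) - i > 1 := by omega
            norm_num [hgt]
            exact hcnt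
        rw [hstep]
        have hrec := ih.1 (i+1) (csAddAt s 1 c ++ [0]) ((s:Int)) (by exact_mod_cast hdrop')
          (by simp [length_csAddAt, hlen])
        push_cast at hrec
        rw [hrec]
        have hk : csRunlen x xs = 0 := by
          cases xs with
          | nil => rfl
          | cons y ys => have : y ≠ x := by simpa using hadj
                         simp [csRunlen, this]
        simp [csChain, hk]


-- ===== VERDICT (by name: the statement is the Claim_ definition above) =====
theorem count_session_spec : Claim_equal_count_session := by
  intro rows _ _
  unfold Spec_count_session count_session count_session_alt
  exact ((csMain _ _).1 0 [] (-1) (by simp) rfl)
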